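-- pv_equiv track=rewrite | github.com/kennybenny-foo/TargetResume | targetResume.py | parse_certifications_text_to_entries
-- ===== SOURCE A (Python) =====
-- def normalize_text_block(value):
--     if value is None:
--         return ""
--     return str(value).strip()
--
-- def parse_certifications_text_to_entries(text):
--     entries = []
--     current = None
--     for raw_line in normalize_text_block(text).splitlines():
--         line = raw_line.strip()
--         if not line:
--             if current:
--                 entries.append(current)
--                 current = None
--             continue
--
--         if current is None:
--             parts = [part.strip() for part in line.split("|")]
--             current = {
--                 "name": parts[0] if parts else "",
--                 "date": " | ".join(parts[1:]) if len(parts) > 1 else "",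
--                 "description": ""
--             }
--         else:
--             current["description"] = f"{current['description']} {line}".strip() if current.get("description") else line
--
--     if current:
--         entries.append(current)
--
--     return [entry for entry in entries if entry.get("name") or entry.get("date") or entry.get("description")]
-- ===== SOURCE B (Python) =====
-- def normalize_text_block(value):
--     if value is None:
--         return ""
--     return str(value).strip()
--
--
-- def parse_certifications_text_to_entries(text):
--     # Phase 1: split the lines into blocks of consecutive non-blank stripped lines.
--     blocks = []
--     block = []
--     for raw_line in normalize_text_block(text).splitlines():
--         line = raw_line.strip()
--         if line:
--             block.append(line)
--         elif block:
--             blocks.append(block)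
--             block = []
--     if block:
--         blocks.append(block)
--
--     # Phase 2: map each block to an entry dict, keeping only truthy entries.
--     result = []
--     for b in blocks:
--         parts = [part.strip() for part in b[0].split("|")]
--         entry = {
--             "name": parts[0],
--             "date": " | ".join(parts[1:]),
--             "description": " ".join(b[1:]),
--         }
--         if entry["name"] or entry["date"] or entry["description"]:
--             result.append(entry)
--     return result
-- ===== Notes on version B (the rewrite author's own statement) =====
-- stated objective: alternative
-- what changed: Replaces A's single pass that threads a partially-built entry dict through the loop with a two-phase shape: first group the stripped non-blank lines into blocks, then map each block to its entry (name/date from block[0], description as ' '.join of the rest) and filter truthy entries.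
import Mathlib
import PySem

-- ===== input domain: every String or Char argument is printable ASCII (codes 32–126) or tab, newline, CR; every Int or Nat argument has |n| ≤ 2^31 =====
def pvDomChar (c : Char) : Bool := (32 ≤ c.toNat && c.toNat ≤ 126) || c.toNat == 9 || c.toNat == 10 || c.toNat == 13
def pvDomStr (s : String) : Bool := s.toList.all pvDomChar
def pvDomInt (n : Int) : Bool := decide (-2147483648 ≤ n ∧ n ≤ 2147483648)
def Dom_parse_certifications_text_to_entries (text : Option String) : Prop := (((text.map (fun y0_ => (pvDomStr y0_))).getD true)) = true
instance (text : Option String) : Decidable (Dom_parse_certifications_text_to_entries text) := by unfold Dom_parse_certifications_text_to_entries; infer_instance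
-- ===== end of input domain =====

-- B replaces A's single pass that threads a partially-built entry through the loop by a
-- two-phase decomposition (group lines into blocks, then map blocks to entries); an
-- alternative of the same cost, not claimed faster.

-- ===== PORT A =====
-- shared module helper normalize_text_block (both Pythons call it); str(value).strip() on an
-- Option String; computed on List Char (PySem.Chars), Strings are materialized only in the
-- final entry dicts.
def pvNormalize (value : Option String) : List Char :=
  match value with
  | none => []
  | some s => PySem.Chars.strip s.toList

-- an entry dict has the fixed distinct keys name/date/description, always created in this
-- insertion order, so both ports carry it as a (name, date, description) triple and
-- materialize the association list here (exact: lookups/updates only ever hit these keys).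
def pvEntryDict (e : List Char × List Char × List Char) : List (String × String) :=
  [("name", String.ofList e.1), ("date", String.ofList e.2.1), ("description", String.ofList e.2.2)]

-- A's loop body: state = (entries, current)
def pvStepA (st : List (List Char × List Char × List Char) × Option (List Char × List Char × List Char))
    (raw_line : List Char) :
    List (List Char × List Char × List Char) × Option (List Char × List Char × List Char) :=
  let line := PySem.Chars.strip raw_line
  if line.isEmpty then
    match st.2 with
    | some c => (st.1 ++ [c], none)
    | none => (st.1, none)
  else
    match st.2 with
    | none =>
        let parts := (PySem.Chars.splitOn line ['|']).map PySem.Chars.strip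
        (st.1, some (parts.headD [],          -- parts[0] if parts else ""
          if 1 < parts.length then PySem.Chars.join [' ', '|', ' '] (parts.drop 1) else [],
          []))
    | some c =>
        (st.1, some (c.1, c.2.1,
          if !c.2.2.isEmpty then PySem.Chars.strip (c.2.2 ++ ' ' :: line) else line))

def parse_certifications_text_to_entries (text : Option String) : List (List (String × String)) :=
  let st := (PySem.Chars.splitlines (pvNormalize text)).foldl pvStepA ([], none)
  let entries := match st.2 with
    | some c => st.1 ++ [c]
    | none => st.1
  (entries.filter (fun e => !(e.1.isEmpty && e.2.1.isEmpty && e.2.2.isEmpty))).map pvEntryDict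

-- ===== PORT B =====
-- phase-1 loop body: state = (blocks, block)
def pvStepB (st : List (List (List Char)) × List (List Char)) (raw_line : List Char) :
    List (List (List Char)) × List (List Char) :=
  let line := PySem.Chars.strip raw_line
  if !line.isEmpty then (st.1, st.2 ++ [line])
  else if !st.2.isEmpty then (st.1 ++ [st.2], [])
  else (st.1, st.2)

-- phase 2: a block (nonempty by construction; b[0] = headD) to its entry triple
def pvEntryOfBlock (b : List (List Char)) : List Char × List Char × List Char :=
  let parts := (PySem.Chars.splitOn (b.headD []) ['|']).map PySem.Chars.strip
  (parts.headD [],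
   PySem.Chars.join [' ', '|', ' '] (parts.drop 1),
   PySem.Chars.join [' '] (b.drop 1))

def parse_certifications_text_to_entries_alt (text : Option String) : List (List (String × String)) :=
  let st := (PySem.Chars.splitlines (pvNormalize text)).foldl pvStepB ([], [])
  let blocks := st.1 ++ (if st.2.isEmpty then [] else [st.2])
  blocks.foldl (fun res b =>
    let e := pvEntryOfBlock b
    if !(e.1.isEmpty && e.2.1.isEmpty && e.2.2.isEmpty) then res ++ [pvEntryDict e] else res) []

-- ===== PRECONDITION & SPEC =====
def Spec_parse_certifications_text_to_entries (text : Option String) (out : List (List (String × String))) : Prop := out = parse_certifications_text_to_entries_alt text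
instance (text : Option String) (out : List (List (String × String))) : Decidable (Spec_parse_certifications_text_to_entries text out) := by unfold Spec_parse_certifications_text_to_entries; infer_instance

-- ===== CLAIM (what is proved, stated in full; the proofs are below) =====
def Claim_equal_parse_certifications_text_to_entries : Prop := ∀ (text : Option String), Dom_parse_certifications_text_to_entries text → Spec_parse_certifications_text_to_entries text (parse_certifications_text_to_entries text)

-- ===== LEMMAS AND PROOFS =====

-- a "good" line: nonempty, and neither end is whitespace (what .strip() outputs when nonempty)
def pvGood (l : List Char) : Prop :=
  l ≠ [] ∧ (∀ c, l.head? = some c → PySem.Chars.isspace c = false)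
        ∧ (∀ c, l.getLast? = some c → PySem.Chars.isspace c = false)

lemma pv_dropWhile_head {p : Char → Bool} {l : List Char} {c : Char}
    (h : (List.dropWhile p l).head? = some c) : p c = false := by
  induction l with
  | nil => simp at h
  | cons a t ih =>
    rw [List.dropWhile_cons] at h
    split at h
    · exact ih h
    · simp_all

lemma pv_dropWhile_eq_self {p : Char → Bool} {l : List Char} {c : Char}
    (hc : l.head? = some c) (hp : p c = false) : List.dropWhile p l = l := by
  cases l with
  | nil => simp at hc
  | cons a t => simp at hc; subst hc; simp [hp]

lemma pv_strip_good (s : List Char) (h : PySem.Chars.strip s ≠ []) : pvGood (PySem.Chars.strip s) := by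
  unfold PySem.Chars.strip PySem.Chars.rstrip PySem.Chars.lstrip at *
  set u := List.dropWhile PySem.Chars.isspace s with hu
  set v := List.dropWhile PySem.Chars.isspace u.reverse with hv
  have hvne : v ≠ [] := by simpa using h
  refine ⟨h, ?_, ?_⟩
  · intro c hc
    rw [List.head?_reverse] at hc
    have hsuf : v <:+ u.reverse := by rw [hv]; exact List.dropWhile_suffix _
    obtain ⟨t, ht⟩ := hsuf
    have : u.reverse.getLast? = some c := by
      rw [← ht, List.getLast?_append_of_ne_nil _ hvne]; exact hc
    rw [List.getLast?_reverse] at this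
    exact pv_dropWhile_head this
  · intro c hc
    rw [List.getLast?_reverse] at hc
    exact pv_dropWhile_head hc

lemma pv_good_sep {x y : List Char} (hx : pvGood x) (hy : pvGood y) :
    PySem.Chars.strip (x ++ ' ' :: y) = x ++ ' ' :: y ∧ pvGood (x ++ ' ' :: y) := by
  obtain ⟨hxne, hxh, hxl⟩ := hx
  obtain ⟨hyne, hyh, hyl⟩ := hy
  obtain ⟨a, x', rfl⟩ := List.exists_cons_of_ne_nil hxne
  have hah : PySem.Chars.isspace a = false := hxh a rfl
  obtain ⟨c, hc⟩ : ∃ c, y.getLast? = some c := by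
    cases hl : y.getLast? with
    | none => exact absurd (List.getLast?_eq_none_iff.mp hl) hyne
    | some c => exact ⟨c, rfl⟩
  have hcw : PySem.Chars.isspace c = false := hyl c hc
  have hlast : ((a :: x') ++ ' ' :: y).getLast? = some c := by
    rw [List.getLast?_append_of_ne_nil _ (by simp)]
    rw [show (' ' :: y) = [' '] ++ y from rfl, List.getLast?_append_of_ne_nil _ hyne]
    exact hc
  have h1 : List.dropWhile PySem.Chars.isspace ((a :: x') ++ ' ' :: y) = (a :: x') ++ ' ' :: y :=
    pv_dropWhile_eq_self (c := a) (by simp) hah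
  have h2 : List.dropWhile PySem.Chars.isspace ((a :: x') ++ ' ' :: y).reverse
      = ((a :: x') ++ ' ' :: y).reverse :=
    pv_dropWhile_eq_self (c := c) (by rw [List.head?_reverse]; exact hlast) hcw
  have hstrip : PySem.Chars.strip ((a :: x') ++ ' ' :: y) = (a :: x') ++ ' ' :: y := by
    unfold PySem.Chars.strip PySem.Chars.lstrip PySem.Chars.rstrip
    rw [h1, h2, List.reverse_reverse]
  refine ⟨hstrip, by simp, ?_, ?_⟩
  · intro d hd; simp at hd; subst hd; exact hah
  · intro d hd
    rw [hlast] at hd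
    obtain rfl := Option.some.inj hd
    exact hcw

lemma pv_join_good (t : List (List Char)) (hne : t ≠ []) (h : ∀ l ∈ t, pvGood l) :
    pvGood (PySem.Chars.join [' '] t) := by
  induction t with
  | nil => exact absurd rfl hne
  | cons x xs ih =>
    cases xs with
    | nil => rw [PySem.Chars.join_singleton]; exact h x (by simp)
    | cons y ys =>
      rw [PySem.Chars.join_cons_cons]
      have hgj := ih (by simp) (fun l hl => h l (by simp [hl]))
      have := (pv_good_sep (h x (by simp)) hgj).2
      simpa [List.append_assoc] using this

lemma pv_join_snoc (t : List (List Char)) (x : List Char) (h : t ≠ []) :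
    PySem.Chars.join [' '] (t ++ [x]) = PySem.Chars.join [' '] t ++ ' ' :: x := by
  induction t with
  | nil => exact absurd rfl h
  | cons a t' ih =>
    cases t' with
    | nil => simp [PySem.Chars.join_singleton, PySem.Chars.join_cons_cons]
    | cons b t'' =>
      rw [show (a :: b :: t'') ++ [x] = a :: (b :: (t'' ++ [x])) from rfl]
      rw [PySem.Chars.join_cons_cons, PySem.Chars.join_cons_cons]
      rw [show b :: (t'' ++ [x]) = (b :: t'') ++ [x] from rfl, ih (by simp)]
      simp

-- a one-line block's entry equals what A computes for the first line of a block
lemma pv_entry_single (line : List Char) :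
    pvEntryOfBlock [line]
      = (((PySem.Chars.splitOn line ['|']).map PySem.Chars.strip).headD [],
         (if 1 < ((PySem.Chars.splitOn line ['|']).map PySem.Chars.strip).length
          then PySem.Chars.join [' ', '|', ' ']
            (((PySem.Chars.splitOn line ['|']).map PySem.Chars.strip).drop 1)
          else []),
         []) := by
  by_cases hp : 1 < ((PySem.Chars.splitOn line ['|']).map PySem.Chars.strip).length
  · rw [if_pos hp]
    unfold pvEntryOfBlock
    simp [PySem.Chars.join_nil]
  · rw [if_neg hp]
    have hnil : ((PySem.Chars.splitOn line ['|']).map PySem.Chars.strip).drop 1 = [] :=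
      List.drop_eq_nil_of_le (by omega)
    unfold pvEntryOfBlock
    simp [hnil, PySem.Chars.join_nil]

-- finalization-- finalization of each loop, and the entry A carries for an in-progress block
def pvFinA (st : List (List Char × List Char × List Char) × Option (List Char × List Char × List Char)) :
    List (List Char × List Char × List Char) :=
  match st.2 with
  | some c => st.1 ++ [c]
  | none => st.1

def pvFinB (st : List (List (List Char)) × List (List Char)) : List (List (List Char)) :=
  st.1 ++ (if st.2.isEmpty then [] else [st.2])

def pvCur (blk : List (List Char)) : Option (List Char × List Char × List Char) :=
  if blk.isEmpty then none else some (pvEntryOfBlock blk)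

lemma pv_loop (lines : List (List Char)) :
    ∀ (bs : List (List (List Char))) (blk : List (List Char)), (∀ l ∈ blk, pvGood l) →
    pvFinA (lines.foldl pvStepA (bs.map pvEntryOfBlock, pvCur blk))
      = (pvFinB (lines.foldl pvStepB (bs, blk))).map pvEntryOfBlock := by
  induction lines with
  | nil =>
    intro bs blk _
    cases blk with
    | nil => simp [pvFinA, pvFinB, pvCur]
    | cons h t => simp [pvFinA, pvFinB, pvCur]
  | cons raw rest ih =>
    intro bs blk hg
    rw [List.foldl_cons, List.foldl_cons]
    by_cases hl : (PySem.Chars.strip raw).isEmpty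
    · cases blk with
      | nil =>
        have hA : pvStepA (bs.map pvEntryOfBlock, pvCur []) raw = (bs.map pvEntryOfBlock, pvCur []) := by
          simp [pvStepA, pvCur, hl]
        have hB : pvStepB (bs, ([] : List (List Char))) raw = (bs, []) := by
          simp [pvStepB, hl]
        rw [hA, hB]; exact ih bs [] (by simp)
      | cons h t =>
        have hA : pvStepA (bs.map pvEntryOfBlock, pvCur (h :: t)) raw
            = ((bs ++ [h :: t]).map pvEntryOfBlock, pvCur []) := by
          simp [pvStepA, pvCur, hl]
        have hB : pvStepB (bs, h :: t) raw = (bs ++ [h :: t], []) := by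
          simp [pvStepB, hl]
        rw [hA, hB]; exact ih (bs ++ [h :: t]) [] (by simp)
    · have hgl : pvGood (PySem.Chars.strip raw) :=
        pv_strip_good raw (by simpa using hl)
      cases blk with
      | nil =>
        have hA : pvStepA (bs.map pvEntryOfBlock, pvCur []) raw
            = (bs.map pvEntryOfBlock, pvCur [PySem.Chars.strip raw]) := by
          rw [pvCur, pvCur]
          simp only [pvStepA, hl, List.isEmpty_nil, if_true, List.isEmpty_cons,
            Bool.false_eq_true, if_false]
          rw [pv_entry_single]
        have hB : pvStepB (bs, ([] : List (List Char))) raw = (bs, [PySem.Chars.strip raw]) := by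
          simp [pvStepB, hl]
        rw [hA, hB]
        exact ih bs [PySem.Chars.strip raw] (by simpa using hgl)
      | cons h t =>
        have hdesc : (if !(PySem.Chars.join [' '] t).isEmpty
              then PySem.Chars.strip (PySem.Chars.join [' '] t ++ ' ' :: PySem.Chars.strip raw)
              else PySem.Chars.strip raw)
            = PySem.Chars.join [' '] (t ++ [PySem.Chars.strip raw]) := by
          cases t with
          | nil => simp [PySem.Chars.join_nil, PySem.Chars.join_singleton]
          | cons y t' =>
            have hjg : pvGood (PySem.Chars.join [' '] (y :: t')) :=
              pv_join_good _ (by simp) (fun l hli => hg l (by simp [hli]))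
            have hjne : (PySem.Chars.join [' '] (y :: t')).isEmpty = false := by
              simpa [List.isEmpty_iff] using hjg.1
            rw [hjne]
            simp only [Bool.not_false, if_true]
            rw [(pv_good_sep hjg hgl).1, pv_join_snoc _ _ (by simp)]
        have hA : pvStepA (bs.map pvEntryOfBlock, pvCur (h :: t)) raw
            = (bs.map pvEntryOfBlock, pvCur ((h :: t) ++ [PySem.Chars.strip raw])) := by
          rw [pvCur, pvCur]
          simp only [pvStepA, hl, List.isEmpty_cons, List.cons_append, Bool.false_eq_true,
            if_false, pvEntryOfBlock, List.headD_cons, List.drop_succ_cons, List.drop_zero]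
          simp only [Prod.mk.injEq, Option.some.injEq, true_and]
          exact hdesc
        have hB : pvStepB (bs, h :: t) raw = (bs, (h :: t) ++ [PySem.Chars.strip raw]) := by
          simp [pvStepB, hl]
        rw [hA, hB]
        refine ih bs ((h :: t) ++ [PySem.Chars.strip raw]) ?_
        intro l hli
        rcases List.mem_append.mp hli with hli | hli
        · exact hg l hli
        · simp at hli; subst hli; exact hgl

-- ===== VERDICT (by name: the statement is the Claim_ definition above) =====
theorem parse_certifications_text_to_entries_spec : Claim_equal_parse_certifications_text_to_entries := by
  intro text _
  unfold Spec_parse_certifications_text_to_entries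
  unfold parse_certifications_text_to_entries parse_certifications_text_to_entries_alt
  simp only []
  have hloop := pv_loop (PySem.Chars.splitlines (pvNormalize text)) [] [] (by simp)
  simp only [List.map_nil] at hloop
  have h0 : pvCur ([] : List (List Char)) = none := by simp [pvCur]
  rw [h0] at hloop
  set st := (PySem.Chars.splitlines (pvNormalize text)).foldl pvStepA ([], none) with hstA
  set stB := (PySem.Chars.splitlines (pvNormalize text)).foldl pvStepB ([], []) with hstB
  have hentries : (match st.2 with
      | some c => st.1 ++ [c]
      | none => st.1) = (pvFinB stB).map pvEntryOfBlock := by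
    rw [← hloop]; rfl
  rw [hentries]
  rw [PySem.List.foldl_append_if
    (fun b => !((pvEntryOfBlock b).1.isEmpty && (pvEntryOfBlock b).2.1.isEmpty && (pvEntryOfBlock b).2.2.isEmpty))
    (fun b => pvEntryDict (pvEntryOfBlock b)) (stB.1 ++ if stB.2.isEmpty then [] else [stB.2]) []]
  rw [show pvFinB stB = stB.1 ++ (if stB.2.isEmpty then [] else [stB.2]) from rfl]
  rw [List.filter_map, List.map_map]
  rfl
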